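-- pv_equiv track=rewrite | github.com/lgb201020/AI-python-study | study/function_example/find_max_charcater.py | max_size_row
-- ===== SOURCE A (Python) =====
-- def matrix(w):
--     '''nrow는 단어가 갖고있는 문자 종류 개수이다.'''
--     rows = []
--     m = []
--     w_list = list(w)
--     nrow = len(set(w_list))
--     w_set_list = list(set(w_list))
--
--     for i in range(nrow):
--         rows = []
--         rows.append(w_set_list[i])
--         m.append(rows)
--     '''반복하는데 비어있는 1차 리스트를 만들고 거기에 단어에 들어가는 문자 종류를 하나 넣은뒤 그 행을 다시 m 리스트에 넣어
--     각 행의 첫번째 요소가 단어에 들어가는 문자 종류가 되는 행렬을 만듬'''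
--     return m
--
-- def count_character(w):
--     '''단어에 있는 문자수 count'''
--     w_character = matrix(w)
--     w_list = list(w)
--
--     for i in range(len(w_list)):
--         for j in range(len(w_character)):
--             if w_list[i] == w_character[j][0]:
--                 w_character[j].append(1)
--     return w_character
--
-- def max_size_row(word):
--     """단어를 받아 2차 배열에서 크기가 가장 큰 행을 선택, index 0 element를 출력 단 아직 가장 큰 값이 중복되는 경우는 고려 안함"""
--     m = count_character(word)
--     list =[]
--     for i in range(len(m)):
--         size = len(m[i])
--         list.append(size)
--     '''
--     최댓값 찾는 알고리즘을 직접 구현한 것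
--     tmp = list[0]
--     for j in range(1,len(list)):
--         if list[j] > tmp:
--             tmp = list[j]
--     '''
--     if len(list) == len(set(list)):
--         most_frequent_character = m[list.index(max(list))][0]
--         return most_frequent_character
--     elif len(list) > len(set(list)):
--         return "?"
-- ===== SOURCE B (Python) =====
-- def max_size_row(word):
--     s = sorted(word)
--     pairs = []
--     prev = None
--     run = 0
--     for ch in s:
--         if ch == prev:
--             run += 1
--         else:
--             if prev is not None:
--                 pairs.append((prev, run))
--             prev = ch
--             run = 1
--     if prev is not None:
--         pairs.append((prev, run))
--     counts = [n for _, n in pairs]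
--     if len(counts) == len(set(counts)):
--         best = max(counts)  # raises ValueError on empty word, exactly as the original
--         for ch, n in pairs:
--             if n == best:
--                 return ch
--     return "?"
-- ===== Notes on version B (the rewrite author's own statement) =====
-- stated objective: faster
-- what changed: Replaces the per-character matrix of appended 1s with its nested occurrences-times-rows scan by sort-then-single-pass run-length encoding over the sorted word, then one distinctness check and one argmax pass.
import Mathlib
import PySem

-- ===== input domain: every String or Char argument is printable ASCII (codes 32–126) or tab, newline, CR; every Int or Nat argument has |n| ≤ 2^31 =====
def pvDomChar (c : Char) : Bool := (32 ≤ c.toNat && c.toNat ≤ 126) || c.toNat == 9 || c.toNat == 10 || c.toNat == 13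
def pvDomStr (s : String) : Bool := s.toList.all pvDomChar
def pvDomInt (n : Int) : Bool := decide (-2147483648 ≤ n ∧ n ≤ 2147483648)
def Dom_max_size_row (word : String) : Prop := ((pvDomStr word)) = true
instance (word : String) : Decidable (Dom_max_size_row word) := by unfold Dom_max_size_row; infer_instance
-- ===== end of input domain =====

-- B replaces A's per-character matrix with nested occurrence×row scans by sort + one-pass
-- run-length encoding (objective: alternative algorithm; equivalence of RETURN values on word ≠ "").

-- ===== PORT A =====
-- A Python row is the heterogeneous list [c, 1, 1, …]; it is represented as (c, ones) with
-- ones : List Int, so len(row) = 1 + ones.length and row[0] = the Char component.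
def pvRowD : Char × List Int := (' ', [])

-- list(set(w_list)) is ported as PySem.Set.ofList (first-occurrence order); Python's hash
-- iteration order is not modelled, but max_size_row's RESULT does not depend on the row order
-- (it is '?' or the unique character of maximal count), which the final proof establishes.
def matrix (w : String) : List (Char × List Int) :=
  let w_list := w.toList
  let nrow : Int := PySem.List.len (PySem.Set.ofList w_list)
  let w_set_list : PySem.Set Char := PySem.Set.ofList w_list
  (PySem.List.pyRange 0 nrow).foldl
    (fun m i => m ++ [(PySem.List.pyGetD w_set_list i ' ', ([] : List Int))]) []

-- 'w_character[j].append(1)' (in-place mutation of row j) is ported as pySetD at index j.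
def count_character (w : String) : List (Char × List Int) :=
  let w_character := matrix w
  let w_list := w.toList
  (PySem.List.pyRange 0 (PySem.List.len w_list)).foldl
    (fun wc i =>
      let x := PySem.List.pyGetD w_list i ' '
      (PySem.List.pyRange 0 (PySem.List.len wc)).foldl
        (fun acc j =>
          let row := PySem.List.pyGetD acc j pvRowD
          if x == row.1 then PySem.List.pySetD acc j (row.1, row.2 ++ [(1 : Int)]) else acc)
        wc)
    w_character

def max_size_row (word : String) : String :=
  let m := count_character word
  let lst : List Int := (PySem.List.pyRange 0 (PySem.List.len m)).foldl
    (fun acc i => acc ++ [1 + ((PySem.List.pyGetD m i pvRowD).2.length : Int)]) []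
  if lst.length = (PySem.Set.ofList lst).length then
    match PySem.List.max? lst (fun x => x) with
    | some mx =>
      match PySem.List.index? lst mx with
      | some k => String.ofList [(PySem.List.pyGetD m (k : Int) pvRowD).1]
      | none => ""   -- unreachable: mx ∈ lst
    | none => ""     -- max([]) raises ValueError in Python: word = "" is outside Pre_
  else "?"           -- len(list) > len(set(list)) is the only other case

-- ===== PORT B =====
-- one step of the run-length pass: state (pairs, prev, run); 'ch == prev' is False while prev is None
def rleStep (st : List (Char × Int) × Option Char × Int) (ch : Char) :
    List (Char × Int) × Option Char × Int :=
  match st.2.1 with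
  | some p => if ch == p then (st.1, some p, st.2.2 + 1)
              else (st.1 ++ [(p, st.2.2)], some ch, 1)
  | none => (st.1, some ch, 1)

-- the for-loop over sorted(word) plus the final flush 'if prev is not None: pairs.append(...)'
def rle (s : List Char) : List (Char × Int) :=
  let st := s.foldl rleStep ([], none, 0)
  match st.2.1 with
  | some p => st.1 ++ [(p, st.2.2)]
  | none => st.1

def max_size_row_alt (word : String) : String :=
  let s := PySem.List.sorted word.toList (fun c => c) false
  let pairs := rle s
  let counts := pairs.map (fun p => p.2)
  if counts.length = (PySem.Set.ofList counts).length then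
    match PySem.List.max? counts (fun x => x) with
    | some best =>
      match pairs.find? (fun p => p.2 == best) with
      | some p => String.ofList [p.1]   -- the 'for ch, n in pairs: if n == best: return ch' loop
      | none => "?"                  -- loop fell through (never: best ∈ counts)
    | none => ""                     -- max([]) raises ValueError in Python: outside Pre_
  else "?"

-- ===== PRECONDITION & SPEC =====
-- Pre_ excludes only the empty string, on which A (and B) raise ValueError (max of empty sequence).
def Pre_max_size_row (word : String) : Prop := word ≠ ""
instance (word : String) : Decidable (Pre_max_size_row word) := by unfold Pre_max_size_row; infer_instance
def pvWitness_max_size_row : String := "abbccc"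

def Spec_max_size_row (word : String) (out : String) : Prop := out = max_size_row_alt word
instance (word : String) (out : String) : Decidable (Spec_max_size_row word out) := by unfold Spec_max_size_row; infer_instance

-- ===== CLAIM (what is proved, stated in full; the proofs are below) =====
def Claim_equal_max_size_row : Prop := ∀ (word : String), Dom_max_size_row word → Pre_max_size_row word → Spec_max_size_row word (max_size_row word)

-- ===== LEMMAS AND PROOFS =====

-- the per-row update the inner index loop of count_character performs
def pvStep (x : Char) (r : Char × List Int) : Char × List Int :=
  if x == r.1 then (r.1, r.2 ++ [(1 : Int)]) else r

theorem pvInnerAux (x : Char) : ∀ (post pre : List (Char × List Int)),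
    (PySem.List.pyRange (pre.length) (pre.length + post.length)).foldl
      (fun acc j =>
        let row := PySem.List.pyGetD acc j pvRowD
        if x == row.1 then PySem.List.pySetD acc j (row.1, row.2 ++ [(1 : Int)]) else acc)
      (pre ++ post)
    = pre ++ post.map (pvStep x) := by
  intro post
  induction post with
  | nil => intro pre; simp [PySem.List.pyRange_one_eq_nil]
  | cons r post ih =>
    intro pre
    have hlt : (pre.length : Int) < pre.length + (r :: post).length := by
      simp
    rw [PySem.List.pyRange_one_cons hlt]
    simp only [List.foldl_cons]
    have hget : PySem.List.pyGetD (pre ++ r :: post) (pre.length : Int) pvRowD = r := by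
      rw [PySem.List.pyGetD_natCast]
      simp [List.getD]
    have hset : ∀ v, PySem.List.pySetD (pre ++ r :: post) (pre.length : Int) v
        = (pre ++ [v]) ++ post := by
      intro v
      rw [PySem.List.pySetD_natCast]
      rw [List.set_append_right _ _ (Nat.le_refl pre.length)]
      simp
    have harith : (pre.length : Int) + 1 = ((pre ++ [pvStep x r]).length : Int) := by
      simp
    have harith2 : (pre.length : Int) + (r :: post).length
        = ((pre ++ [pvStep x r]).length : Int) + post.length := by
      simp
      omega
    rw [hget]
    by_cases hx : x == r.1
    · rw [if_pos hx, hset, harith, harith2]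
      have := ih (pre ++ [pvStep x r])
      simp only [pvStep, if_pos hx] at this ⊢
      rw [this]
      simp [pvStep, hx]
    · rw [if_neg hx]
      have : pre ++ r :: post = (pre ++ [r]) ++ post := by simp
      rw [this]
      have hr : pvStep x r = r := by simp [pvStep, hx]
      have h3 : (pre.length : Int) + 1 = ((pre ++ [r]).length : Int) := by simp
      have h4 : (pre.length : Int) + (r :: post).length
          = ((pre ++ [r]).length : Int) + post.length := by
        simp
        omega
      rw [h3, h4, ih (pre ++ [r])]
      simp [hr]

theorem pvMatrix_eq (w : String) :
    matrix w = (PySem.Set.ofList w.toList).map (fun c => (c, ([] : List Int))) := by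
  unfold matrix
  rw [PySem.List.foldl_pyRange_zero_pyGetD (PySem.Set.ofList w.toList) ' '
        (fun acc x => acc ++ [(x, ([] : List Int))]) []]
  rw [PySem.List.foldl_append_singleton_eq_map]
  simp

theorem pvFoldStep (xs : List Char) : ∀ (l : List (Char × List Int)),
    xs.foldl (fun wc x => wc.map (pvStep x)) l
    = l.map (fun r => (r.1, r.2 ++ List.replicate (xs.count r.1) (1 : Int))) := by
  induction xs with
  | nil => intro l; simp
  | cons x xs ih =>
    intro l
    rw [List.foldl_cons, ih (l.map (pvStep x)), List.map_map]
    apply List.map_congr_left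
    intro r _
    simp only [Function.comp, pvStep]
    by_cases hx : x == r.1
    · simp [List.count_cons, hx, List.replicate_succ]
    · simp [List.count_cons, hx]

theorem pvCount_character_eq (w : String) :
    count_character w
    = (PySem.Set.ofList w.toList).map
        (fun c => (c, List.replicate (w.toList.count c) (1 : Int))) := by
  unfold count_character
  rw [pvMatrix_eq]
  rw [PySem.List.foldl_pyRange_zero_pyGetD w.toList ' '
        (fun wc x =>
          (PySem.List.pyRange 0 (PySem.List.len wc)).foldl
            (fun acc j =>
              let row := PySem.List.pyGetD acc j pvRowD
              if x == row.1 then PySem.List.pySetD acc j (row.1, row.2 ++ [(1 : Int)]) else acc)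
            wc)
        ((PySem.Set.ofList w.toList).map (fun c => (c, ([] : List Int))))]
  have hinner : ∀ (x : Char) (wc : List (Char × List Int)),
      (PySem.List.pyRange 0 (PySem.List.len wc)).foldl
        (fun acc j =>
          let row := PySem.List.pyGetD acc j pvRowD
          if x == row.1 then PySem.List.pySetD acc j (row.1, row.2 ++ [(1 : Int)]) else acc)
        wc = wc.map (pvStep x) := by
    intro x wc
    have := pvInnerAux x wc []
    simpa using this
  calc w.toList.foldl _ _ = w.toList.foldl (fun wc x => wc.map (pvStep x))
          ((PySem.Set.ofList w.toList).map (fun c => (c, ([] : List Int)))) := by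
          apply PySem.List.foldl_congr_mem
          intro wc x _
          exact hinner x wc
    _ = _ := by
          rw [pvFoldStep, List.map_map]
          simp

-- B-side: the pairs accumulator is only appended to
theorem pvRlePrefix : ∀ (xs : List Char) (P₀ P : List (Char × Int)) (pr : Option Char) (run : Int),
    xs.foldl rleStep (P₀ ++ P, pr, run)
    = (P₀ ++ (xs.foldl rleStep (P, pr, run)).1, (xs.foldl rleStep (P, pr, run)).2) := by
  intro xs
  induction xs with
  | nil => intro P₀ P pr run; rfl
  | cons ch xs ih =>
    intro P₀ P pr run
    simp only [List.foldl_cons]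
    cases pr with
    | none => exact ih P₀ P (some ch) 1
    | some p =>
      by_cases h : ch == p
      · simp only [rleStep, if_pos h]
        exact ih P₀ P (some p) _
      · simp only [rleStep, if_neg h]
        rw [List.append_assoc]
        exact ih P₀ (P ++ [(p, run)]) (some ch) 1

theorem pvRleRepl (a : Char) : ∀ (n : Nat) (k : Int),
    (List.replicate n a).foldl rleStep ([], some a, k) = ([], some a, k + n) := by
  intro n
  induction n with
  | zero => intro k; simp
  | succ n ih =>
    intro k
    rw [List.replicate_succ, List.foldl_cons]
    have hstep : rleStep ([], some a, k) a = ([], some a, k + 1) := by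
      simp [rleStep]
    rw [hstep, ih (k + 1)]
    congr 2
    omega

theorem pvRleRun (a : Char) (n : Nat) (r : List Char) (hn : 0 < n) (ha : a ∉ r) :
    rle (List.replicate n a ++ r) = (a, (n : Int)) :: rle r := by
  obtain ⟨m, rfl⟩ : ∃ m, n = m + 1 := ⟨n - 1, by omega⟩
  unfold rle
  rw [List.replicate_succ, List.cons_append, List.foldl_cons, List.foldl_append]
  have hstep0 : rleStep ([], none, 0) a = ([], some a, 1) := by simp [rleStep]
  rw [hstep0, pvRleRepl a m 1]
  cases r with
  | nil =>
    simp
    ring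
  | cons b r' =>
    have hba : (b == a) = false := by
      rw [beq_eq_false_iff_ne]
      intro h
      exact ha (h ▸ List.mem_cons_self ..)
    simp only [List.foldl_cons]
    have hstep1 : rleStep ([], some a, 1 + (m : Int)) b
        = ([(a, 1 + (m : Int))], some b, 1) := by
      simp [rleStep, hba]
    have hstep2 : rleStep ([], none, 0) b = ([], some b, 1) := by simp [rleStep]
    rw [hstep1, hstep2]
    have hpre := pvRlePrefix r' [(a, 1 + (m : Int))] [] (some b) 1
    simp only [List.append_nil] at hpre
    rw [hpre]
    have hn : (1 + (m : Int)) = ((m + 1 : Nat) : Int) := by push_cast; ring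
    cases hst : (r'.foldl rleStep ([], some b, 1)).2.1 with
    | some p => simp [hn]
    | none => simp [hn]

theorem pvSortedDecomp : ∀ (t₀ : List Char) (a : Char), (a :: t₀).Pairwise (· ≤ ·) →
    ∃ (n : Nat) (r : List Char), a :: t₀ = List.replicate (n + 1) a ++ r ∧ a ∉ r ∧
      r.Pairwise (· ≤ ·) := by
  intro t₀
  induction t₀ with
  | nil => intro a _; exact ⟨0, [], by simp, by simp, List.Pairwise.nil⟩
  | cons b t₁ ih =>
    intro a hpw
    have hpw' : (b :: t₁).Pairwise (· ≤ ·) := hpw.of_cons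
    by_cases hab : a = b
    · subst hab
      obtain ⟨n, r, heq, hnr, hr⟩ := ih a hpw'
      refine ⟨n + 1, r, ?_, hnr, hr⟩
      rw [List.replicate_succ, List.cons_append, ← heq]
    · refine ⟨0, b :: t₁, by simp, ?_, hpw'⟩
      intro hmem
      rcases List.mem_cons.mp hmem with h | h
      · exact hab h
      · have h1 : a ≤ b := (List.pairwise_cons.mp hpw).1 b (List.mem_cons_self ..)
        have h2 : b ≤ a := (List.pairwise_cons.mp hpw').1 a h
        exact hab (le_antisymm h1 h2)

theorem pvOfListRepl (a : Char) : ∀ (n : Nat), 0 < n →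
    PySem.Set.ofList (List.replicate n a) = [a] := by
  intro n
  induction n with
  | zero => intro h; exact absurd h (lt_irrefl 0)
  | succ n ih =>
    intro _
    rw [List.replicate_succ, PySem.Set.ofList_cons]
    cases n with
    | zero => simp [PySem.Set.discard]
    | succ m =>
      rw [ih (Nat.succ_pos m)]
      simp [PySem.Set.discard]

theorem pvRleSorted : ∀ (t : List Char), t.Pairwise (· ≤ ·) →
    rle t = (PySem.Set.ofList t).map (fun c => (c, (t.count c : Int))) := by
  suffices h : ∀ (N : Nat) (t : List Char), t.length ≤ N → t.Pairwise (· ≤ ·) →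
      rle t = (PySem.Set.ofList t).map (fun c => (c, (t.count c : Int))) by
    intro t hpw; exact h t.length t le_rfl hpw
  intro N
  induction N with
  | zero =>
    intro t hle _
    have : t = [] := List.eq_nil_of_length_eq_zero (Nat.le_zero.mp hle)
    subst this; rfl
  | succ N IHN =>
    intro t hle hpw
    match t, hle, hpw with
    | [], _, _ => rfl
    | a :: t₀, hle, hpw =>
      obtain ⟨n, r, heq, hnr, hr⟩ := pvSortedDecomp t₀ a hpw
      rw [heq, pvRleRun a (n + 1) r (Nat.succ_pos n) hnr]
      have hlen : r.length ≤ N := by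
        have := congrArg List.length heq
        simp [List.length_replicate] at this
        simp at hle
        omega
      rw [IHN r hlen hr]
      rw [PySem.Set.ofList_append, pvOfListRepl a (n + 1) (Nat.succ_pos n)]
      have hfilter : List.filter (fun y => !(PySem.Set.contains [a] y)) (PySem.Set.ofList r)
          = PySem.Set.ofList r := by
        rw [List.filter_eq_self]
        intro y hy
        have hyr : y ∈ r := (PySem.Set.mem_ofList r y).mp hy
        have hya : y ≠ a := fun h => hnr (h ▸ hyr)
        simp [PySem.Set.contains, hya]
      rw [PySem.Set.update_eq_append_filter, hfilter]
      rw [List.singleton_append, List.map_cons]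
      have hca : List.count a (List.replicate (n + 1) a ++ r) = n + 1 := by
        rw [List.count_append, List.count_replicate, List.count_eq_zero.mpr hnr]
        simp
      rw [hca]
      congr 1
      apply List.map_congr_left
      intro c hc
      have hcr : c ∈ r := (PySem.Set.mem_ofList r c).mp hc
      have hcna : (a == c) = false := by
        rw [beq_eq_false_iff_ne]
        intro h
        exact hnr (h ▸ hcr)
      rw [List.count_append, List.count_replicate, hcna]
      simp

theorem pvLenOfListLt {xs : List Int} (h : ¬ xs.Nodup) :
    (PySem.Set.ofList xs).length < xs.length := by
  induction xs with
  | nil => exact absurd List.nodup_nil h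
  | cons x t ih =>
    rw [PySem.Set.ofList_cons]
    simp only [List.length_cons]
    have hsplit : x ∈ t ∨ ¬ t.Nodup := by
      by_cases hx : x ∈ t
      · exact Or.inl hx
      · by_cases hnd : t.Nodup
        · exact absurd (List.nodup_cons.mpr ⟨hx, hnd⟩) h
        · exact Or.inr hnd
    unfold PySem.Set.discard
    rcases hsplit with hx | hnd
    · have hmem : x ∈ PySem.Set.ofList t := (PySem.Set.mem_ofList t x).mpr hx
      have hlt : (List.filter (fun y => !(y == x)) (PySem.Set.ofList t)).length
          < (PySem.Set.ofList t).length := by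
        rw [List.length_filter_lt_length_iff_exists]
        exact ⟨x, hmem, by simp⟩
      have := PySem.Set.length_ofList_le t
      omega
    · have hle := List.length_filter_le (fun y => !(y == x)) (PySem.Set.ofList t)
      have := ih hnd
      omega

theorem pvLenOfListIff (xs : List Int) :
    (xs.length = (PySem.Set.ofList xs).length) ↔ xs.Nodup := by
  constructor
  · intro h
    by_contra hnd
    have := pvLenOfListLt hnd
    omega
  · intro h
    rw [PySem.Set.ofList_eq_self_of_nodup xs h]

-- ===== VERDICT (by name: the statement is the Claim_ definition above) =====
-- characterisation of A's size list
theorem pvA_lst (word : String) :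
    (PySem.List.pyRange 0 (PySem.List.len (count_character word))).foldl
      (fun acc i => acc ++ [1 + (((PySem.List.pyGetD (count_character word) i pvRowD).2.length : Int))]) []
    = (PySem.Set.ofList word.toList).map (fun c => 1 + (word.toList.count c : Int)) := by
  rw [PySem.List.foldl_pyRange_zero_pyGetD (count_character word) pvRowD
        (fun acc r => acc ++ [1 + (r.2.length : Int)]) []]
  rw [PySem.List.foldl_append_singleton_eq_map, pvCount_character_eq, List.map_map]
  simp

-- characterisation of B's pairs list
theorem pvB_pairs (word : String) :
    rle (PySem.List.sorted word.toList (fun c => c) false)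
    = (PySem.Set.ofList (PySem.List.sorted word.toList (fun c => c) false)).map
        (fun c => (c, (word.toList.count c : Int))) := by
  have hpw : (PySem.List.sorted word.toList (fun c => c) false).Pairwise (· ≤ ·) := by
    have := PySem.List.sorted_pairwise word.toList (fun c => c)
    simpa using this
  rw [pvRleSorted _ hpw]
  apply List.map_congr_left
  intro c _
  have := (PySem.List.sorted_perm word.toList (fun c => c) false).count_eq c
  rw [this]

theorem max_size_row_spec : Claim_equal_max_size_row := by
  intro word _ hpre
  unfold Spec_max_size_row
  have hwne : word.toList ≠ [] := by
    simpa [String.toList_eq_nil_iff] using hpre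
  set w := word.toList with hw
  set ds : List Char := PySem.Set.ofList w with hds
  set t : List Char := PySem.List.sorted w (fun c => c) false with ht
  set es : List Char := PySem.Set.ofList t with hes
  have hdsne : ds ≠ [] := by
    intro hh
    rcases List.exists_mem_of_ne_nil w hwne with ⟨x, hx⟩
    have hmem : x ∈ ds := by rw [hds]; exact (PySem.Set.mem_ofList w x).mpr hx
    rw [hh] at hmem
    exact List.not_mem_nil hmem
  have hesperm : es.Perm ds := by
    rw [hes, hds]
    rw [List.perm_ext_iff_of_nodup (PySem.Set.nodup_ofList t) (PySem.Set.nodup_ofList w)]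
    intro a
    rw [PySem.Set.mem_ofList, PySem.Set.mem_ofList, ht, PySem.List.mem_sorted]
  have hesne : es ≠ [] := by
    intro hh
    have := hesperm.length_eq
    rw [hh] at this
    exact hdsne (List.eq_nil_of_length_eq_zero this.symm)
  simp only [max_size_row, max_size_row_alt]
  rw [pvA_lst word, pvB_pairs word, ← hw, ← hds, ← ht, ← hes]
  have hmapsnd : (es.map (fun c => (c, (List.count c w : Int)))).map (fun p => p.2)
      = es.map (fun c => (List.count c w : Int)) := by
    rw [List.map_map]; rfl
  rw [hmapsnd]
  set lst : List Int := ds.map (fun c => 1 + (List.count c w : Int)) with hlst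
  set counts : List Int := es.map (fun c => (List.count c w : Int)) with hcounts
  have hlstmap : lst = (ds.map (fun c => (List.count c w : Int))).map (fun v => 1 + v) := by
    rw [hlst, List.map_map]; rfl
  have hnodA : lst.Nodup ↔ (ds.map (fun c => (List.count c w : Int))).Nodup := by
    rw [hlstmap]
    exact List.nodup_map_iff (fun a b h => by omega)
  have hnodB : counts.Nodup ↔ (ds.map (fun c => (List.count c w : Int))).Nodup :=
    (hesperm.map (fun c => (List.count c w : Int))).nodup_iff
  by_cases hnd : (ds.map (fun c => (List.count c w : Int))).Nodup
  · rw [if_pos ((pvLenOfListIff lst).mpr (hnodA.mpr hnd))]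
    rw [if_pos ((pvLenOfListIff counts).mpr (hnodB.mpr hnd))]
    have hlstne : lst ≠ [] := by
      rw [hlst]; simpa using hdsne
    have hcountsne : counts ≠ [] := by
      rw [hcounts]; simpa using hesne
    obtain ⟨mx, hmx⟩ : ∃ mx, PySem.List.max? lst (fun x => x) = some mx := by
      rcases h : PySem.List.max? lst (fun x => x) with _ | v
      · exact absurd ((PySem.List.max?_eq_none_iff lst _).mp h) hlstne
      · exact ⟨v, rfl⟩
    obtain ⟨best, hbest⟩ : ∃ b, PySem.List.max? counts (fun x => x) = some b := by
      rcases h : PySem.List.max? counts (fun x => x) with _ | v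
      · exact absurd ((PySem.List.max?_eq_none_iff counts _).mp h) hcountsne
      · exact ⟨v, rfl⟩
    simp only [hmx, hbest]
    obtain ⟨k, hk⟩ : ∃ k, PySem.List.index? lst mx = some k := by
      rcases h : PySem.List.index? lst mx with _ | v
      · rw [← Option.not_isSome_iff_eq_none] at h
        exact absurd ((PySem.List.index?_isSome_iff lst mx).mpr (PySem.List.max?_mem hmx)) h
      · exact ⟨v, rfl⟩
    simp only [hk]
    obtain ⟨p, hp⟩ : ∃ p,
        (es.map (fun c => (c, (List.count c w : Int)))).find? (fun p => p.2 == best) = some p := by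
      have hmem : best ∈ counts := PySem.List.max?_mem hbest
      rw [hcounts] at hmem
      rcases List.mem_map.mp hmem with ⟨c, hc, hfc⟩
      have : ((es.map (fun c => (c, (List.count c w : Int)))).find?
          (fun p => p.2 == best)).isSome := by
        rw [List.find?_isSome]
        exact ⟨(c, (List.count c w : Int)), List.mem_map.mpr ⟨c, hc, rfl⟩, by simp [hfc]⟩
      rcases Option.isSome_iff_exists.mp this with ⟨p, hp⟩
      exact ⟨p, hp⟩
    simp only [hp]
    obtain ⟨hklt, hlstk, _⟩ := PySem.List.getElem_of_index?_eq_some hk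
    have hklt' : k < ds.length := by
      have : lst.length = ds.length := by rw [hlst, List.length_map]
      omega
    have hAchar : (PySem.List.pyGetD (count_character word) (k : Int) pvRowD).1 = ds[k]'hklt' := by
      rw [PySem.List.pyGetD_natCast, pvCount_character_eq]
      rw [List.getD_eq_getElem?_getD]
      rw [List.getElem?_eq_getElem (by simpa [← hds, ← hw] using hklt')]
      simp [← hds, ← hw]
    have hlstk' : 1 + (List.count (ds[k]'hklt') w : Int) = mx := by
      simp only [hlst, List.getElem_map] at hlstk
      exact hlstk
    have hpmem := List.mem_of_find?_eq_some hp
    have hppred := List.find?_some hp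
    rcases List.mem_map.mp hpmem with ⟨c, hcmem, hpc⟩
    have hpc2 : (List.count c w : Int) = best := by
      have hb : p.2 = best := by rwa [beq_iff_eq] at hppred
      rw [← hpc] at hb
      exact hb
    have hmaxA := PySem.List.max?_isMax hmx
    have hmaxB := PySem.List.max?_isMax hbest
    have h1 : (List.count (ds[k]'hklt') w : Int) ≤ best := by
      have hmem : (List.count (ds[k]'hklt') w : Int) ∈ counts := by
        rw [hcounts]
        exact (hesperm.map _).mem_iff.mpr (List.mem_map.mpr ⟨_, List.getElem_mem hklt', rfl⟩)
      exact hmaxB _ hmem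
    have h2 : best ≤ (List.count (ds[k]'hklt') w : Int) := by
      have hmem : best ∈ ds.map (fun c => (List.count c w : Int)) := by
        rw [← hpc2]
        exact (hesperm.map _).mem_iff.mp
          (by rw [← hcounts]; exact List.mem_map.mpr ⟨c, hcmem, rfl⟩)
      rcases List.mem_map.mp hmem with ⟨c', hc', hfc'⟩
      have hin : 1 + (List.count c' w : Int) ∈ lst := by
        rw [hlst]
        exact List.mem_map.mpr ⟨c', hc', rfl⟩
      have := hmaxA _ hin
      simp only at this
      omega
    have hfeq : (List.count (ds[k]'hklt') w : Int) = best := le_antisymm h1 h2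
    have hceq : c = ds[k]'hklt' := by
      apply List.inj_on_of_nodup_map hnd
      · exact hesperm.mem_iff.mp hcmem
      · exact List.getElem_mem hklt'
      · rw [hpc2, hfeq]
    rw [hAchar, ← hpc, hceq]
  · rw [if_neg (fun h => hnd (hnodA.mp ((pvLenOfListIff lst).mp h)))]
    rw [if_neg (fun h => hnd (hnodB.mp ((pvLenOfListIff counts).mp h)))]
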